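-- pv_equiv track=rewrite | github.com/PLSE-Lab/Python-MLAPI-expl | python_sources/yake-brown-clustering-pipeline.py | get_clusters_maybe
-- ===== SOURCE A (Python) =====
-- def get_clusters_maybe(megacluster):
--     # so it looks like all the clustres have been concatenated to a single array
--     # but they're in alphabetical order so we can use that to un-cat them
--
--     # create list with one sub list
--     cluster_list = [[]]
--     list_index = 0
--
--     # look at all words but last (since we compare each word
--     # to the next word)
--     for i in range(len(megacluster) - 1):
--         if megacluster[i - 1] < megacluster[i]:
--             # add current word to current sublist
--             cluster_list[list_index].append(megacluster[i])
--         else: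
--             # create a new sublist
--             cluster_list.append([])
--             list_index = list_index + 1
--
--             # add current word
--             cluster_list[list_index].append(megacluster[i])
--
--     return(cluster_list)
-- ===== SOURCE B (Python) =====
-- def get_clusters_maybe(megacluster):
--     # Two-pass: compute break positions first, then slice the processed prefix.
--     prefix = megacluster[:-1]
--     breaks = [i for i in range(len(prefix)) if megacluster[i - 1] >= megacluster[i]]
--     bounds = [0] + breaks + [len(prefix)]
--     return [prefix[a:b] for a, b in zip(bounds, bounds[1:])]
-- ===== Notes on version B (the rewrite author's own statement) =====
-- stated objective: alternative
-- what changed: Replaces A's single interleaved loop that appends to or starts the current sublist with a two-pass decomposition: first collect all break indices (where the previous element, with the i=0 wraparound to the last element, is not smaller), then cut the dropped-last-element prefix into slices at those break positions.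
import Mathlib
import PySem

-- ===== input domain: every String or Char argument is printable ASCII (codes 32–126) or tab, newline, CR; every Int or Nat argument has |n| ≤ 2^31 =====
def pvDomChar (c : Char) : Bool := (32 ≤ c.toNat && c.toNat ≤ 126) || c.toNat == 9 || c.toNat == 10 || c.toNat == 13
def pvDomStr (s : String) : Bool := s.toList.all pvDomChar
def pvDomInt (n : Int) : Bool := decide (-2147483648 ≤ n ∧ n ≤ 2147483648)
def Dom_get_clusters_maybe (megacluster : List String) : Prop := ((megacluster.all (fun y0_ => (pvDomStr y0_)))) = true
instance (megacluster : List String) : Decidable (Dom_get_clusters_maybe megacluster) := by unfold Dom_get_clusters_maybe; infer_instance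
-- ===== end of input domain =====

-- B replaces A's interleaved append-or-new-sublist loop by a two-pass break-table-then-slice construction (same cost; objective: alternative decomposition).

-- ===== PORT A =====
def get_clusters_maybe (megacluster : List String) : List (List String) :=
  -- cluster_list = [[]]; list_index = 0; for i in range(len(megacluster)-1): …
  (((PySem.List.pyRange 0 ((megacluster.length : Int) - 1) 1).foldl
    (fun (st : List (List String) × Nat) (i : Int) =>
      if PySem.List.pyGetD megacluster (i - 1) "" < PySem.List.pyGetD megacluster i "" then
        (st.1.modify st.2 (fun s => s ++ [PySem.List.pyGetD megacluster i ""]), st.2)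
      else
        ((st.1 ++ [[]]).modify (st.2 + 1) (fun s => s ++ [PySem.List.pyGetD megacluster i ""]),
         st.2 + 1))
    ([[]], 0)).1)

-- ===== PORT B =====
def get_clusters_maybe_alt (megacluster : List String) : List (List String) :=
  let pref := PySem.List.slice megacluster none (some (-1))      -- megacluster[:-1]
  let breaks := (PySem.List.pyRange 0 (pref.length : Int) 1).filter
    (fun i => PySem.List.pyGetD megacluster (i - 1) "" ≥ PySem.List.pyGetD megacluster i "")
  let bounds := [(0 : Int)] ++ breaks ++ [(pref.length : Int)]
  (bounds.zip (PySem.List.slice bounds (some 1) none)).map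
    (fun ab => PySem.List.slice pref (some ab.1) (some ab.2))

-- ===== PRECONDITION & SPEC =====
def Spec_get_clusters_maybe (megacluster : List String) (out : List (List String)) : Prop := out = get_clusters_maybe_alt megacluster
instance (megacluster : List String) (out : List (List String)) : Decidable (Spec_get_clusters_maybe megacluster out) := by unfold Spec_get_clusters_maybe; infer_instance

-- ===== CLAIM (what is proved, stated in full; the proofs are below) =====
def Claim_equal_get_clusters_maybe : Prop := ∀ (megacluster : List String), Dom_get_clusters_maybe megacluster → Spec_get_clusters_maybe megacluster (get_clusters_maybe megacluster)

-- ===== LEMMAS AND PROOFS =====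

-- common specification: segments of m's first k elements, split where the previous
-- element (with Python's -1 wraparound at index 0) is not < the current one
def pvSegs (m : List String) : Nat → List (List String)
  | 0 => [[]]
  | k+1 =>
    if PySem.List.pyGetD m ((k : Int) - 1) "" < PySem.List.pyGetD m (k : Int) "" then
      (pvSegs m k).dropLast ++ [((pvSegs m k).getLastD []) ++ [PySem.List.pyGetD m (k : Int) ""]]
    else
      pvSegs m k ++ [[PySem.List.pyGetD m (k : Int) ""]]

theorem pvSegs_ne_nil (m : List String) (k : Nat) : pvSegs m k ≠ [] := by
  cases k with
  | zero => simp [pvSegs]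
  | succ k => simp [pvSegs]; split_ifs <;> simp

theorem modify_last {α : Type} (cl : List α) (f : α → α) (d : α) (h : cl ≠ []) :
    cl.modify (cl.length - 1) f = cl.dropLast ++ [f (cl.getLastD d)] := by
  induction cl with
  | nil => simp at h
  | cons a cl ih =>
    cases cl with
    | nil => simp [List.modify]
    | cons b cl =>
      simp only [List.length_cons, List.dropLast_cons₂, List.getLastD_cons]
      rw [Nat.add_sub_cancel, List.modify_succ_cons]
      have := ih (by simp)
      simp only [List.length_cons, Nat.add_sub_cancel] at this
      simp only [this, List.cons_append, List.cons.injEq, true_and]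
      congr 2
      cases cl with
      | nil => simp
      | cons c cl =>
        cases hc : (c :: cl).getLast? with
        | none => simp at hc
        | some x => simp [hc]

theorem modify_append_len {α : Type} (xs : List α) (y : α) (f : α → α) :
    (xs ++ [y]).modify xs.length f = xs ++ [f y] := by
  induction xs with
  | nil => simp [List.modify]
  | cons a xs ih => simp [List.modify_succ_cons, ih]

-- A's fold computes pvSegs together with the index of the last sublist
theorem afold_eq (m : List String) (k : Nat) :
    (PySem.List.pyRange 0 (k : Int) 1).foldl
      (fun (st : List (List String) × Nat) (i : Int) =>
        if PySem.List.pyGetD m (i - 1) "" < PySem.List.pyGetD m i "" then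
          (st.1.modify st.2 (fun s => s ++ [PySem.List.pyGetD m i ""]), st.2)
        else
          ((st.1 ++ [[]]).modify (st.2 + 1) (fun s => s ++ [PySem.List.pyGetD m i ""]),
           st.2 + 1))
      ([[]], 0)
    = (pvSegs m k, (pvSegs m k).length - 1) := by
  induction k with
  | zero => simp [pvSegs]
  | succ k ih =>
    have hsplit : PySem.List.pyRange 0 ((k : Int) + 1) 1
        = PySem.List.pyRange 0 (k : Int) 1 ++ [(k : Int)] :=
      PySem.List.pyRange_one_succ_right (by positivity)
    push_cast
    rw [hsplit, List.foldl_append, ih]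
    simp only [List.foldl_cons, List.foldl_nil]
    have hne := pvSegs_ne_nil m k
    have hlen : 1 ≤ (pvSegs m k).length := List.length_pos_iff.mpr hne
    by_cases hlt : PySem.List.pyGetD m ((k : Int) - 1) "" < PySem.List.pyGetD m (k : Int) ""
    · rw [if_pos hlt]
      have hmod := modify_last (pvSegs m k) (fun s => s ++ [PySem.List.pyGetD m (k : Int) ""]) [] hne
      simp only [pvSegs]
      rw [if_pos hlt, Prod.mk.injEq]
      refine ⟨hmod, ?_⟩
      simp only [List.length_append, List.length_dropLast, List.length_cons, List.length_nil]
      omega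
    · rw [if_neg hlt]
      have hidx : (pvSegs m k).length - 1 + 1 = (pvSegs m k).length := by omega
      rw [hidx, modify_append_len]
      simp only [pvSegs]
      rw [if_neg hlt, Prod.mk.injEq]
      refine ⟨rfl, ?_⟩
      simp

-- B-side: recursive form of the zip-with-tail slicing
def pvPairs (P : List String) : List Int → List (List String)
  | a :: b :: rest => PySem.List.slice P (some a) (some b) :: pvPairs P (b :: rest)
  | _ => []

theorem zip_tail_eq_pvPairs (P : List String) (bs : List Int) :
    (bs.zip bs.tail).map (fun ab => PySem.List.slice P (some ab.1) (some ab.2))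
      = pvPairs P bs := by
  induction bs with
  | nil => simp [pvPairs]
  | cons a bs ih =>
    cases bs with
    | nil => simp [pvPairs]
    | cons b rest =>
      simp only [List.tail_cons, List.zip_cons_cons, List.map_cons, pvPairs]
      simp only [List.tail_cons] at ih
      rw [ih]

theorem getLast_cons_append_singleton {α : Type} (a : α) (ys : List α) (j : α) (h : a :: (ys ++ [j]) ≠ []) :
    (a :: (ys ++ [j])).getLast h = j := by
  induction ys generalizing a with
  | nil => simp
  | cons b ys ih =>
    simp only [List.cons_append] at *
    rw [List.getLast_cons (by simp)]
    exact ih b _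

theorem pvPairs_append_last (P : List String) (a : Int) (bs : List Int) (j : Int) :
    pvPairs P (a :: (bs ++ [j]))
      = pvPairs P (a :: bs) ++ [PySem.List.slice P (some ((a :: bs).getLast (by simp))) (some j)] := by
  induction bs generalizing a with
  | nil => simp [pvPairs]
  | cons b bs ih =>
    simp only [List.cons_append, pvPairs]
    rw [ih b]
    simp

theorem slice_extend (P : List String) (a b : Nat) (hab : a ≤ b) (hb : b < P.length) :
    PySem.List.slice P (some (a : Int)) (some ((b : Int) + 1))
      = PySem.List.slice P (some (a : Int)) (some (b : Int)) ++ [P[b]] := by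
  have h1 : ((b : Int) + 1) = ((b + 1 : Nat) : Int) := by push_cast; ring
  rw [h1, PySem.List.slice_natCast, PySem.List.slice_natCast]
  have h2 : b + 1 - a = (b - a) + 1 := by omega
  rw [h2, List.take_add_one]
  congr 1
  have : (P.drop a)[b - a]? = some P[b] := by
    rw [List.getElem?_drop]
    have : a + (b - a) = b := by omega
    rw [this, List.getElem?_eq_getElem hb]
  simp [this]

-- the last entry of 0 :: (breaks below k) is a natural number ≤ k
theorem getLast_front_bound (p : Int → Bool) (k : Nat) :
    ∃ L : Nat, ((0 : Int) :: (PySem.List.pyRange 0 (k : Int) 1).filter p).getLast (by simp)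
        = (L : Int) ∧ L ≤ k := by
  have hmem : ((0 : Int) :: (PySem.List.pyRange 0 (k : Int) 1).filter p).getLast (by simp)
      ∈ (0 : Int) :: (PySem.List.pyRange 0 (k : Int) 1).filter p := List.getLast_mem _
  rcases List.mem_cons.mp hmem with h0 | hmem'
  · exact ⟨0, by simp [h0], by omega⟩
  · have hr := (PySem.List.mem_pyRange_one).mp (List.mem_filter.mp hmem').1
    refine ⟨(((0 : Int) :: (PySem.List.pyRange 0 (k : Int) 1).filter p).getLast (by simp)).toNat,
      by omega, by omega⟩

theorem bfold_eq (m : List String) (P : List String) (hP : P = m.dropLast) (k : Nat)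
    (hk : k ≤ P.length) :
    pvPairs P ((0 : Int) :: ((PySem.List.pyRange 0 (k : Int) 1).filter
        (fun i => PySem.List.pyGetD m (i - 1) "" ≥ PySem.List.pyGetD m i "") ++ [(k : Int)]))
      = pvSegs m k := by
  induction k with
  | zero =>
    have hs : PySem.List.slice P none (some (0 : Int)) = [] := by
      rw [PySem.List.slice_to P (le_refl (0 : Int))]
      simp
    simp [pvPairs, pvSegs, hs]
  | succ k ih =>
    have hk' : k ≤ P.length := by omega
    have hklt : k < P.length := by omega
    have ihh := ih hk'
    have hsplit : PySem.List.pyRange 0 ((k : Int) + 1) 1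
        = PySem.List.pyRange 0 (k : Int) 1 ++ [(k : Int)] :=
      PySem.List.pyRange_one_succ_right (by positivity)
    have hPk : P[k]'hklt = PySem.List.pyGetD m (k : Int) "" := by
      subst hP
      rw [PySem.List.pyGetD_natCast, List.getElem_dropLast]
      have hkm : k < m.length := by
        have := hklt
        rw [List.length_dropLast] at this
        omega
      simp [List.getD, List.getElem?_eq_getElem hkm]
    push_cast
    rw [hsplit, List.filter_append]
    by_cases hge : PySem.List.pyGetD m ((k : Int) - 1) "" ≥ PySem.List.pyGetD m (k : Int) ""
    · -- a break at k: a new singleton segment starts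
      have hfk : List.filter (fun i => decide (PySem.List.pyGetD m (i - 1) "" ≥ PySem.List.pyGetD m i "")) [(k : Int)] = [(k : Int)] := by
        rw [List.filter_cons]
        rw [if_pos (by exact decide_eq_true hge)]
        rfl
      rw [hfk, pvPairs_append_last]
      rw [getLast_cons_append_singleton, ihh]
      have hsl : PySem.List.slice P (some (k : Int)) (some ((k : Int) + 1)) = [P[k]'hklt] := by
        rw [slice_extend P k k (le_refl k) hklt, PySem.List.slice_natCast]
        simp
      rw [hsl, hPk]
      simp only [pvSegs]
      rw [if_neg (not_lt.mpr hge)]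
    · -- no break at k: the last segment is extended by one element
      have hfk : List.filter (fun i => decide (PySem.List.pyGetD m (i - 1) "" ≥ PySem.List.pyGetD m i "")) [(k : Int)] = [] := by
        rw [List.filter_cons]
        rw [if_neg (by simpa using hge)]
        rfl
      rw [hfk, List.append_nil, pvPairs_append_last]
      rw [pvPairs_append_last] at ihh
      rcases getLast_front_bound
        (fun i => decide (PySem.List.pyGetD m (i - 1) "" ≥ PySem.List.pyGetD m i "")) k with ⟨L, hLeq, hLle⟩
      rw [hLeq] at ihh ⊢
      rw [slice_extend P L k hLle hklt, hPk]
      simp only [pvSegs]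
      rw [if_pos (lt_of_not_ge hge)]
      rw [← ihh]
      rw [List.dropLast_concat, List.getLastD_concat]

theorem get_clusters_maybe_eq_segs (m : List String) :
    get_clusters_maybe m = pvSegs m (m.length - 1) := by
  unfold get_clusters_maybe
  cases m with
  | nil =>
    simp [PySem.List.pyRange_one_eq_nil (by norm_num : (-1 : Int) ≤ 0), pvSegs]
  | cons a m =>
    have h : (((a :: m).length : Int)) - 1 = (((a :: m).length - 1 : Nat) : Int) := by
      simp
    rw [h, afold_eq]

theorem get_clusters_maybe_alt_eq_segs (m : List String) :
    get_clusters_maybe_alt m = pvSegs m (m.length - 1) := by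
  unfold get_clusters_maybe_alt
  simp only [PySem.List.slice_to_neg_one, PySem.List.slice_from_one]
  rw [zip_tail_eq_pvPairs]
  have hlen : m.dropLast.length = m.length - 1 := List.length_dropLast
  have hb := bfold_eq m m.dropLast rfl (m.dropLast.length) (le_refl _)
  rw [hlen] at hb
  simpa using hb

-- ===== VERDICT (by name: the statement is the Claim_ definition above) =====
theorem get_clusters_maybe_spec : Claim_equal_get_clusters_maybe := by
  intro m _
  unfold Spec_get_clusters_maybe
  rw [get_clusters_maybe_eq_segs, get_clusters_maybe_alt_eq_segs]
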